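-- pv_equiv track=rewrite | github.com/mirusu400/FadCrypt | ui/dialogs/app_scanner_dialog.py | _categorize_windows_app
-- ===== SOURCE A (Python) =====
-- def _categorize_windows_app(filepath: str) -> str:
--     """Categorize Windows app based on install location"""
--     filepath_lower = filepath.lower()
--
--     if 'steam' in filepath_lower or 'games' in filepath_lower:
--         return 'Games'
--     elif 'microsoft office' in filepath_lower or 'libreoffice' in filepath_lower:
--         return 'Office'
--     elif any(x in filepath_lower for x in ['chrome', 'firefox', 'edge', 'browser']):
--         return 'Internet'
--     elif any(x in filepath_lower for x in ['vscode', 'visual studio', 'pycharm', 'intellij', 'eclipse']):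
--         return 'Development'
--     elif any(x in filepath_lower for x in ['photoshop', 'gimp', 'paint', 'illustrator']):
--         return 'Graphics'
--     elif any(x in filepath_lower for x in ['vlc', 'media', 'spotify', 'itunes', 'winamp']):
--         return 'Multimedia'
--     elif 'system32' in filepath_lower or 'windows' in filepath_lower:
--         return 'System'
--     else:
--         return 'Other'
-- ===== SOURCE B (Python) =====
-- # Different decomposition: flat keyword->priority map, one full scan keeping the
-- # minimum matched priority (no early exit, no per-category branching), then a
-- # table lookup; priority 7 = no match = 'Other'.
-- _CATS = ['Games', 'Office', 'Internet', 'Development',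
--          'Graphics', 'Multimedia', 'System', 'Other']
--
-- _KEYWORD_PRIORITY = {
--     'steam': 0, 'games': 0,
--     'microsoft office': 1, 'libreoffice': 1,
--     'chrome': 2, 'firefox': 2, 'edge': 2, 'browser': 2,
--     'vscode': 3, 'visual studio': 3, 'pycharm': 3, 'intellij': 3, 'eclipse': 3,
--     'photoshop': 4, 'gimp': 4, 'paint': 4, 'illustrator': 4,
--     'vlc': 5, 'media': 5, 'spotify': 5, 'itunes': 5, 'winamp': 5,
--     'system32': 6, 'windows': 6,
-- }
--
-- def _categorize_windows_app(filepath: str) -> str: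
--     fl = filepath.lower()
--     best = 7
--     for kw, pri in _KEYWORD_PRIORITY.items():
--         if kw in fl:
--             best = min(best, pri)
--     return _CATS[best]
-- ===== Notes on version B (the rewrite author's own statement) =====
-- stated objective: alternative
-- what changed: Replaces the first-match if/elif chain over category groups with a single flat keyword-to-priority map scanned in full with a running minimum; the best (smallest) matched priority indexes a category table, with 7 meaning the fallback category.
import Mathlib
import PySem

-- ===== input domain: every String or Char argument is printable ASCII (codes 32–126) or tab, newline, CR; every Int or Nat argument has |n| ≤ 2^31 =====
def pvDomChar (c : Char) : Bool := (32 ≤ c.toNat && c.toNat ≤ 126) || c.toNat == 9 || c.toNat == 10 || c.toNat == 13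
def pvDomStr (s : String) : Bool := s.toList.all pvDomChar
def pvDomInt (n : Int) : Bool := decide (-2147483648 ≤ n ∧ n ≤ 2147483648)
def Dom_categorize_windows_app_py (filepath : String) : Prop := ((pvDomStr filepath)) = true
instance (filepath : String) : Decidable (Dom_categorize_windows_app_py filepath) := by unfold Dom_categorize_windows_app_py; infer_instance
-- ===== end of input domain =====

-- B replaces the first-match if/elif chain with a flat keyword→priority map scanned in full
-- with a running minimum, then a table lookup (alternative decomposition; same cost).
-- ===== PORT A =====
def categorize_windows_app_py (filepath : String) : String :=
  let fl := PySem.Str.lower filepath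
  if PySem.Str.isIn "steam" fl || PySem.Str.isIn "games" fl then "Games"
  else if PySem.Str.isIn "microsoft office" fl || PySem.Str.isIn "libreoffice" fl then "Office"
  else if (["chrome", "firefox", "edge", "browser"].any (fun x => PySem.Str.isIn x fl)) then "Internet"
  else if (["vscode", "visual studio", "pycharm", "intellij", "eclipse"].any (fun x => PySem.Str.isIn x fl)) then "Development"
  else if (["photoshop", "gimp", "paint", "illustrator"].any (fun x => PySem.Str.isIn x fl)) then "Graphics"
  else if (["vlc", "media", "spotify", "itunes", "winamp"].any (fun x => PySem.Str.isIn x fl)) then "Multimedia"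
  else if PySem.Str.isIn "system32" fl || PySem.Str.isIn "windows" fl then "System"
  else "Other"

-- ===== PORT B =====
-- _CATS table; index 7 is 'Other'
def catTable : List String :=
  ["Games", "Office", "Internet", "Development", "Graphics", "Multimedia", "System", "Other"]

-- _KEYWORD_PRIORITY in insertion order
def kwPriority : List (String × Nat) :=
  [("steam", 0), ("games", 0),
   ("microsoft office", 1), ("libreoffice", 1),
   ("chrome", 2), ("firefox", 2), ("edge", 2), ("browser", 2),
   ("vscode", 3), ("visual studio", 3), ("pycharm", 3), ("intellij", 3), ("eclipse", 3),
   ("photoshop", 4), ("gimp", 4), ("paint", 4), ("illustrator", 4),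
   ("vlc", 5), ("media", 5), ("spotify", 5), ("itunes", 5), ("winamp", 5),
   ("system32", 6), ("windows", 6)]

def categorize_windows_app_py_alt (filepath : String) : String :=
  let fl := PySem.Str.lower filepath
  let best := kwPriority.foldl
    (fun b p => if PySem.Str.isIn p.1 fl then min b p.2 else b) 7
  -- _CATS[best]: best is always in [0,7], so plain list indexing is exact here
  catTable.getD best ""

-- ===== PRECONDITION & SPEC =====
def Spec_categorize_windows_app_py (filepath : String) (out : String) : Prop := out = categorize_windows_app_py_alt filepath
instance (filepath : String) (out : String) : Decidable (Spec_categorize_windows_app_py filepath out) := by unfold Spec_categorize_windows_app_py; infer_instance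

-- ===== CLAIM =====
def Claim_equal_categorize_windows_app_py : Prop := ∀ (filepath : String), Dom_categorize_windows_app_py filepath → Spec_categorize_windows_app_py filepath (categorize_windows_app_py filepath)

-- ===== LEMMAS AND PROOFS =====

-- keyword groups in priority order; kwPriority = pvItems 0 pvGroups
def pvGroups : List (List String) :=
  [["steam", "games"],
   ["microsoft office", "libreoffice"],
   ["chrome", "firefox", "edge", "browser"],
   ["vscode", "visual studio", "pycharm", "intellij", "eclipse"],
   ["photoshop", "gimp", "paint", "illustrator"],
   ["vlc", "media", "spotify", "itunes", "winamp"],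
   ["system32", "windows"]]

def pvItems : Nat → List (List String) → List (String × Nat)
  | _, [] => []
  | n, g :: gs => g.map (fun k => (k, n)) ++ pvItems (n+1) gs

-- index of the first group containing a matching keyword
def pvFirstIdx (m : String → Bool) : Nat → List (List String) → Option Nat
  | _, [] => none
  | n, g :: gs => if g.any m then some n else pvFirstIdx m (n+1) gs

lemma pvItems_eq : kwPriority = pvItems 0 pvGroups := by rfl

lemma pvFirstIdx_le {m : String → Bool} : ∀ (gs : List (List String)) (n i : Nat),
    pvFirstIdx m n gs = some i → n ≤ i := by
  intro gs
  induction gs with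
  | nil => intro n i h; simp [pvFirstIdx] at h
  | cons g gs ih =>
    intro n i h
    simp only [pvFirstIdx] at h
    split at h
    · injection h with h; omega
    · exact Nat.le_of_succ_le (ih (n+1) i h)

lemma pvFold_group (m : String → Bool) (n : Nat) : ∀ (g : List String) (acc : Nat),
    (g.map (fun k => (k, n))).foldl (fun b p => if m p.1 then min b p.2 else b) acc
      = if g.any m then min acc n else acc := by
  intro g
  induction g with
  | nil => intro acc; simp
  | cons k g ih =>
    intro acc
    simp only [List.map_cons, List.foldl_cons, List.any_cons]
    by_cases hk : m k
    · simp [hk, ih]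
    · simp [hk, ih]

lemma pvFold_items (m : String → Bool) : ∀ (gs : List (List String)) (n acc : Nat),
    (pvItems n gs).foldl (fun b p => if m p.1 then min b p.2 else b) acc
      = match pvFirstIdx m n gs with
        | none => acc
        | some i => min acc i := by
  intro gs
  induction gs with
  | nil => intro n acc; simp [pvItems, pvFirstIdx]
  | cons g gs ih =>
    intro n acc
    simp only [pvItems, pvFirstIdx, List.foldl_append, pvFold_group, ih]
    by_cases hg : g.any m
    · simp only [hg, if_true]
      cases h : pvFirstIdx m (n+1) gs with
      | none => simp
      | some i =>
        have hle := pvFirstIdx_le (m := m) gs (n+1) i h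
        have hmin : min (min acc n) i = min acc n :=
          Nat.min_eq_left (le_trans (Nat.min_le_right acc n) (by omega))
        simp [hmin]
    · simp [hg]

lemma pvFold_items_str (fl : String) (gs : List (List String)) (n acc : Nat) :
    (pvItems n gs).foldl (fun b p => if PySem.Str.isIn p.1 fl then min b p.2 else b) acc
      = match pvFirstIdx (fun k => PySem.Str.isIn k fl) n gs with
        | none => acc
        | some i => min acc i :=
  pvFold_items (fun k => PySem.Str.isIn k fl) gs n acc

-- ===== VERDICT =====
theorem categorize_windows_app_py_spec : Claim_equal_categorize_windows_app_py := by
  intro filepath _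
  unfold Spec_categorize_windows_app_py
  simp only [categorize_windows_app_py, categorize_windows_app_py_alt, pvItems_eq,
    pvFold_items_str]
  simp only [pvFirstIdx, pvGroups, List.any_cons, List.any_nil, Bool.or_false]
  split_ifs <;> rfl
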